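-- pv_equiv track=rewrite | github.com/SymmetricChaos/NumberTheory | Sequences/MathUtils.py | int_to_pow_sum_str
-- ===== SOURCE A (Python) =====
-- def int_to_pow_sum_str(n,B):
--     """
--     Write n as a sum of multiples of powers of B, returns a string
--
--     Args:
--         n -- non-negative integer, the number to be represented
--         B -- integer greater than 1, the base
--     """
--
--     if n == 0:
--         return "0"
--
--     n = abs(n)
--     D = []
--
--     while n != 0:
--         n,r = divmod(n,B)
--         D.append(r)
--
--     D.reverse()
--     p = len(D)-1
--
--     if len(D) == 1:
--         return str(D[0])
--
--     if D[0] == 1: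
--         s = f"{B}^{p}"
--     else:
--         s = f"{D[0]}·{B}^{p}"
--
--     for m in D[1:-1]:
--         p -= 1
--         if m == 0:
--             pass
--         elif m == 1:
--             s += f" + {B}^{p}"
--         else:
--             s += f" + {m}·{B}^{p}"
--
--     if D[-1] != 0:
--         s += f" + {D[-1]}"
--
--     return s
-- ===== SOURCE B (Python) =====
-- def int_to_pow_sum_str(n, B):
--     """Recursive formulation: no digit list, no reverse, no regions.
--     go(n, p) renders the digits of n at powers p, p+1, ... directly,
--     most-significant part first via the recursive call on the quotient."""
--     if n == 0:
--         return "0"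
--
--     def go(n, p):
--         q, r = divmod(n, B)
--         if r == 0:
--             term = ""
--         elif p == 0:
--             term = str(r)
--         elif r == 1:
--             term = f"{B}^{p}"
--         else:
--             term = f"{r}\u00b7{B}^{p}"
--         if q == 0:
--             return term
--         if term == "":
--             return go(q, p + 1)
--         return go(q, p + 1) + " + " + term
--
--     return go(abs(n), 0)
-- ===== Notes on version B (the rewrite author's own statement) =====
-- stated objective: simpler
-- what changed: A builds a digit list with a loop, reverses it, and concatenates three hand-unrolled regions (first digit, middle loop, trailing digit); B builds no list at all: a single recursive function on the quotient renders the string directly, most-significant part first.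
import Mathlib
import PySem

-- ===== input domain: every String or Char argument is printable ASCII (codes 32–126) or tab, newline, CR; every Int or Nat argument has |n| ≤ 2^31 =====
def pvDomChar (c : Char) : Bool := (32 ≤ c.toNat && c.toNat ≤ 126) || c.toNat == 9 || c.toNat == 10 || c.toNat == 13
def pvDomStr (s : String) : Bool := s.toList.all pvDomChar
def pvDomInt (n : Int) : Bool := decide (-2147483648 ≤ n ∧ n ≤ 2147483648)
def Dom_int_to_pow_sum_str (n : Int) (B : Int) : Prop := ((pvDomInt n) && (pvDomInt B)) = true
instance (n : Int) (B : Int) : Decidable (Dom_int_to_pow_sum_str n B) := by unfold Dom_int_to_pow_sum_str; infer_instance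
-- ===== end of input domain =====

-- B replaces A's digit list + reverse + three-region concatenation by one recursive function on
-- the quotient that renders the string directly (objective: simpler).

-- ===== PORT A =====
-- Termination fact for the digit-extraction while loop of A and the recursion of B
-- (cited by the decreasing_by of pyDigits and goB).
theorem pyDigits_measure (n B : Int) (h : (2 ≤ B ∧ 0 < n) ∨ (B ≤ -2 ∧ n ≠ 0)) :
    (PySem.Int.floordiv n B).natAbs < n.natAbs ∨
    ((PySem.Int.floordiv n B).natAbs = n.natAbs ∧ ¬ 0 < PySem.Int.floordiv n B ∧ 0 < n) := by
  have hkey := PySem.Int.floordiv_mul_add_mod n B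
  set q := PySem.Int.floordiv n B with hq
  set r := PySem.Int.mod n B with hr
  rcases h with ⟨hB, hn⟩ | ⟨hB, hn⟩
  · have hr0 : 0 ≤ r := PySem.Int.mod_nonneg n (by omega)
    have hr1 : r < B := PySem.Int.mod_lt n (by omega)
    have hq0 : 0 ≤ q := by nlinarith
    have hqn : q < n := by nlinarith
    left; omega
  · have hb := PySem.Int.mod_neg_bounds n (b := B) (by omega)
    rcases lt_trichotomy n 0 with hlt | hz | hgt
    · have hq0 : 0 ≤ q := by nlinarith
      have hqn : q < -n := by nlinarith
      left; omega
    · omega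
    · have hq0 : q ≤ 0 := by nlinarith
      have hqn : -n ≤ q := by nlinarith
      rcases eq_or_lt_of_le hqn with he | hl
      · right; constructor
        · omega
        · constructor
          · omega
          · omega
      · left; omega
-- The while loop `while n != 0: n, r = divmod(n, B); D.append(r)`.  The dite guard only makes the
-- recursion total: inside Pre_ (B ≥ 2 or B ≤ -2, and A enters the loop with n = abs(n) > 0) it is
-- exactly Python's `n != 0` test.
def pyDigits (n B : Int) : List Int :=
  if h : (2 ≤ B ∧ 0 < n) ∨ (B ≤ -2 ∧ n ≠ 0) then
    PySem.Int.mod n B :: pyDigits (PySem.Int.floordiv n B) B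
  else []
termination_by (n.natAbs, (if 0 < n then 1 else 0 : Nat))
decreasing_by
  rcases pyDigits_measure n B h with h1 | ⟨h1, h2, h3⟩
  · exact Prod.Lex.left _ _ h1
  · rw [h1]; apply Prod.Lex.right; simp [h2, h3]

def int_to_pow_sum_str (n : Int) (B : Int) : String :=
  if n = 0 then "0"
  else
    let D := (pyDigits |n| B).reverse
    let p : Int := (D.length : Int) - 1
    if D.length = 1 then PySem.Int.toStr (PySem.List.pyGetD D 0 0)
    else
      let s :=
        if PySem.List.pyGetD D 0 0 = 1 then
          PySem.Int.toStr B ++ "^" ++ PySem.Int.toStr p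
        else
          PySem.Int.toStr (PySem.List.pyGetD D 0 0) ++ "·" ++ PySem.Int.toStr B ++ "^" ++ PySem.Int.toStr p
      let sp :=
        (PySem.List.slice D (some 1) (some (-1))).foldl
          (fun (sp : String × Int) (m : Int) =>
            letI p := sp.2 - 1
            (if m = 0 then sp.1
             else if m = 1 then sp.1 ++ " + " ++ PySem.Int.toStr B ++ "^" ++ PySem.Int.toStr p
             else sp.1 ++ " + " ++ PySem.Int.toStr m ++ "·" ++ PySem.Int.toStr B ++ "^" ++ PySem.Int.toStr p,
             p))
          (s, p)
      if PySem.List.pyGetD D (-1) 0 ≠ 0 then sp.1 ++ " + " ++ PySem.Int.toStr (PySem.List.pyGetD D (-1) 0)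
      else sp.1

-- ===== PORT B =====
-- Source B's nested recursive `go(n, p)`.  The same dite guard makes the recursion total; inside
-- Pre_ the function is only ever reached with n ≠ 0, exactly as in Python.
def goB (B n p : Int) : String :=
  if h : (2 ≤ B ∧ 0 < n) ∨ (B ≤ -2 ∧ n ≠ 0) then
    let q := PySem.Int.floordiv n B
    let r := PySem.Int.mod n B
    let term : String :=
      if r = 0 then ""
      else if p = 0 then PySem.Int.toStr r
      else if r = 1 then PySem.Int.toStr B ++ "^" ++ PySem.Int.toStr p
      else PySem.Int.toStr r ++ "·" ++ PySem.Int.toStr B ++ "^" ++ PySem.Int.toStr p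
    if q = 0 then term
    else if term = "" then goB B q (p + 1)
    else goB B q (p + 1) ++ " + " ++ term
  else ""
termination_by (n.natAbs, (if 0 < n then 1 else 0 : Nat))
decreasing_by
  all_goals
    rcases pyDigits_measure n B h with h1 | ⟨h1, h2, h3⟩
    · exact Prod.Lex.left _ _ h1
    · rw [h1]; apply Prod.Lex.right; simp [h2, h3]

def int_to_pow_sum_str_alt (n : Int) (B : Int) : String :=
  if n = 0 then "0" else goB B |n| 0

-- ===== PRECONDITION & SPEC =====
-- Pre_ admits every input where A terminates: for n ≠ 0 the loop raises ZeroDivisionError at B = 0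
-- and never terminates for B = 1 or B = -1.
def Pre_int_to_pow_sum_str (n : Int) (B : Int) : Prop := n = 0 ∨ 2 ≤ B ∨ B ≤ -2
instance (n : Int) (B : Int) : Decidable (Pre_int_to_pow_sum_str n B) := by
  unfold Pre_int_to_pow_sum_str; infer_instance
def pvWitness_int_to_pow_sum_str : Int × Int := (13, 3)

def Spec_int_to_pow_sum_str (n : Int) (B : Int) (out : String) : Prop := out = int_to_pow_sum_str_alt n B
instance (n : Int) (B : Int) (out : String) : Decidable (Spec_int_to_pow_sum_str n B out) := by
  unfold Spec_int_to_pow_sum_str; infer_instance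

-- ===== CLAIM (what is proved, stated in full; the proofs are below) =====
def Claim_equal_int_to_pow_sum_str : Prop := ∀ (n : Int) (B : Int), Dom_int_to_pow_sum_str n B → Pre_int_to_pow_sum_str n B → Spec_int_to_pow_sum_str n B (int_to_pow_sum_str n B)

-- ===== LEMMAS AND PROOFS =====

theorem pyDigits_ne_nil (n B : Int) (h : (2 ≤ B ∧ 0 < n) ∨ (B ≤ -2 ∧ n ≠ 0)) : pyDigits n B ≠ [] := by
  rw [pyDigits]; simp [h]

theorem getLast?_cons_of_ne_nil' {a : Int} {l : List Int} (h : l ≠ []) : (a :: l).getLast? = l.getLast? := by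
  rcases l with _ | ⟨x, xs⟩
  · simp at h
  · simp [List.getLast?_cons_cons]

theorem pyDigits_getLast_ne (n B : Int) : ∀ d, (pyDigits n B).getLast? = some d → d ≠ 0 := by
  refine pyDigits.induct B (motive := fun n => ∀ d, (pyDigits n B).getLast? = some d → d ≠ 0) ?_ ?_ n
  · intro n h ih d hd
    rw [pyDigits, dif_pos h] at hd
    by_cases htail : pyDigits (PySem.Int.floordiv n B) B = []
    · rw [htail, List.getLast?_singleton] at hd
      have hkey := PySem.Int.floordiv_mul_add_mod n B
      have hq : PySem.Int.floordiv n B = 0 := by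
        by_contra hq0
        rcases h with ⟨hB, hn⟩ | ⟨hB, hn⟩
        · have hnn : 0 ≤ PySem.Int.floordiv n B := by
            rw [PySem.Int.floordiv_eq_ediv_of_pos (by omega)]
            exact Int.ediv_nonneg (by omega) (by omega)
          exact pyDigits_ne_nil _ _ (Or.inl ⟨hB, by omega⟩) htail
        · exact pyDigits_ne_nil _ _ (Or.inr ⟨hB, hq0⟩) htail
      rw [hq] at hkey
      simp at hkey
      have hn0 : n ≠ 0 := by rcases h with ⟨_, hn⟩ | ⟨_, hn⟩ <;> omega
      simp at hd
      omega
    · rw [getLast?_cons_of_ne_nil' htail] at hd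
      exact ih d hd
  · intro n h d hd
    rw [pyDigits, dif_neg h] at hd
    simp at hd

def bpow (B p : Int) : String := PySem.Int.toStr B ++ "^" ++ PySem.Int.toStr p
def termNZ (B p m : Int) : String :=
  if m = 1 then bpow B p else PySem.Int.toStr m ++ "·" ++ bpow B p
def tB (B p m : Int) : String := if p = 0 then PySem.Int.toStr m else termNZ B p m
def descTerms (B : Int) : Int → List Int → List String
  | _, [] => []
  | p, m :: ms => (if m = 0 then [] else [tB B p m]) ++ descTerms B (p - 1) ms
def sepCat : List String → String
  | [] => ""
  | t :: ts => (" + " ++ t) ++ sepCat ts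
-- the rendering of a (descending-power) digit list starting at power p: first term, then " + "-separated rest
def dstr (B p : Int) (l : List Int) : String :=
  match descTerms B p l with
  | [] => ""
  | t :: ts => t ++ sepCat ts

def midsA (B : Int) : Int → List Int → String
  | _, [] => ""
  | p, m :: ms => (if m = 0 then "" else " + " ++ termNZ B (p - 1) m) ++ midsA B (p - 1) ms

theorem sepCat_append (l1 l2 : List String) : sepCat (l1 ++ l2) = sepCat l1 ++ sepCat l2 := by
  induction l1 with
  | nil => simp [sepCat]
  | cons t ts ih => simp [sepCat, ih, String.append_assoc]

theorem toChars_ne_nil (r : Int) : PySem.Int.toChars r ≠ [] := by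
  unfold PySem.Int.toChars
  split
  · simp
  · exact List.ne_nil_of_length_pos Nat.length_toDigits_pos

theorem toStr_ne_empty (r : Int) : PySem.Int.toStr r ≠ "" := by
  intro h
  apply toChars_ne_nil r
  have h2 := congrArg String.toList h
  rw [PySem.Int.toList_toStr] at h2
  simpa using h2

theorem descTerms_append (B : Int) : ∀ (l : List Int) (p x : Int),
    descTerms B p (l ++ [x]) = descTerms B p l ++ (if x = 0 then [] else [tB B (p - l.length) x]) := by
  intro l
  induction l with
  | nil => intro p x; simp [descTerms]
  | cons m ms ih =>
    intro p x
    simp only [List.cons_append, descTerms, ih, List.append_assoc, List.length_cons]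
    push_cast
    ring_nf

theorem foldA (B : Int) : ∀ (ms : List Int) (s : String) (p : Int),
    ms.foldl (fun (sp : String × Int) (m : Int) =>
            letI p := sp.2 - 1
            (if m = 0 then sp.1
             else if m = 1 then sp.1 ++ " + " ++ PySem.Int.toStr B ++ "^" ++ PySem.Int.toStr p
             else sp.1 ++ " + " ++ PySem.Int.toStr m ++ "·" ++ PySem.Int.toStr B ++ "^" ++ PySem.Int.toStr p,
             p)) (s, p)
      = (s ++ midsA B p ms, p - ms.length) := by
  intro ms
  induction ms with
  | nil => intro s p; simp [midsA]
  | cons m ms ih =>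
    intro s p
    rw [List.foldl_cons]
    by_cases hm : m = 0
    · simp only [hm, reduceIte, ih, midsA, Prod.mk.injEq]
      refine ⟨by simp, by push_cast [List.length_cons]; ring⟩
    · by_cases h1 : m = 1 <;>
        simp only [hm, h1, reduceIte, ih, midsA, Prod.mk.injEq] <;>
        refine ⟨by simp [termNZ, bpow, h1, String.append_assoc], by push_cast [List.length_cons]; ring⟩

theorem bridge (B : Int) : ∀ (ms : List Int) (p x : Int), p = ms.length →
    sepCat (descTerms B p (ms ++ [x])) = midsA B (p + 1) ms ++ (if x = 0 then "" else " + " ++ PySem.Int.toStr x) := by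
  intro ms
  induction ms with
  | nil =>
    intro p x hp
    simp at hp
    subst hp
    by_cases hx : x = 0 <;> simp [descTerms, sepCat, tB, midsA, hx]
  | cons m ms ih =>
    intro p x hp
    have hp0 : p ≠ 0 := by simp at hp; omega
    simp only [List.cons_append, descTerms, sepCat_append, ih (p - 1) x (by simp at hp ⊢; omega)]
    by_cases hm : m = 0
    · simp [hm, midsA, sepCat]
    · simp only [hm, midsA, sepCat, tB, hp0, reduceIte, sub_add_cancel]
      simp [String.append_assoc]

theorem sliceMid {α : Type} (l : List α) (h : 2 ≤ l.length) :
    PySem.List.slice l (some 1) (some (-1)) = l.tail.dropLast := by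
  simp only [PySem.List.slice, Int.reduceNeg, Order.lt_one_iff, PySem.List.clampIdx_neg_ofNat,
    zero_le_one, PySem.List.clampIdx_of_nonneg, Int.toNat_one]
  rw [List.dropLast_eq_take]
  have h1 : min 1 l.length = 1 := by omega
  rw [h1, List.drop_one]
  congr 1
  simp

theorem pyGetD_zero_cons (a x : Int) (l : List Int) : PySem.List.pyGetD (a :: l) 0 x = a := by
  simp [PySem.List.pyGetD, PySem.List.pyGet?, PySem.List.pyIdx?]

theorem pyGetD_neg_one (l : List Int) (x : Int) (h : l ≠ []) :
    PySem.List.pyGetD l (-1) x = l.getLast?.getD x := by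
  have hl : 1 ≤ l.length := by cases l; simp at h; simp
  simp [PySem.List.pyGetD, PySem.List.pyGet?, PySem.List.pyIdx?, hl, List.getLast?_eq_getElem?]

-- characterization of Source B's recursive go: it renders the reversed digit list of n starting at
-- power p + (number of digits of n) - 1
theorem term_ne_empty (B r p : Int) (hr : r ≠ 0) :
    (if r = 0 then ""
     else if p = 0 then PySem.Int.toStr r
     else if r = 1 then PySem.Int.toStr B ++ "^" ++ PySem.Int.toStr p
     else PySem.Int.toStr r ++ "·" ++ PySem.Int.toStr B ++ "^" ++ PySem.Int.toStr p) ≠ "" := by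
  rw [if_neg hr]
  split_ifs with h1 h2
  · exact toStr_ne_empty r
  · intro h
    have h2' := congrArg String.toList h
    simp only [String.toList_append] at h2'
    rcases List.append_eq_nil_iff.mp (List.append_eq_nil_iff.mp h2').1 with ⟨hA, _⟩
    exact toChars_ne_nil B (by rw [← PySem.Int.toList_toStr]; exact hA)
  · intro h
    have h2' := congrArg String.toList h
    simp only [String.toList_append] at h2'
    rcases List.append_eq_nil_iff.mp (List.append_eq_nil_iff.mp (List.append_eq_nil_iff.mp (List.append_eq_nil_iff.mp h2').1).1).1 with ⟨hA, _⟩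
    exact toChars_ne_nil r (by rw [← PySem.Int.toList_toStr]; exact hA)

theorem goChar_aux (B : Int) : ∀ (N : Nat) (n p : Int),
    2 * n.natAbs + (if 0 < n then 1 else 0) ≤ N →
    ((2 ≤ B ∧ 0 < n) ∨ (B ≤ -2 ∧ n ≠ 0)) →
    goB B n p = dstr B (p + ((pyDigits n B).length : Int) - 1) (pyDigits n B).reverse := by
  intro N
  induction N with
  | zero =>
    intro n p hm hg
    exfalso
    have hn0 : n ≠ 0 := by rcases hg with ⟨_, h⟩ | ⟨_, h⟩ <;> omega
    have h1 : 1 ≤ n.natAbs := Int.natAbs_pos.mpr hn0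
    split at hm <;> omega
  | succ N ih =>
    intro n p hm hg
    have hkey := PySem.Int.floordiv_mul_add_mod n B
    set q := PySem.Int.floordiv n B with hq
    set r := PySem.Int.mod n B with hr
    have hn0 : n ≠ 0 := by rcases hg with ⟨_, h⟩ | ⟨_, h⟩ <;> omega
    rw [goB, dif_pos hg, pyDigits, dif_pos hg]
    simp only [← hq, ← hr]
    by_cases hq0 : q = 0
    · have hrn : r = n := by rw [hq0] at hkey; omega
      have hr0 : r ≠ 0 := by omega
      have hdig0 : pyDigits q B = [] := by
        rw [hq0, pyDigits, dif_neg (by norm_num)]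
      rw [if_pos hq0, hdig0]
      have hp : p + (([r] : List Int).length : Int) - 1 = p := by simp
      simp only [List.reverse_singleton, hp]
      simp [dstr, descTerms, sepCat, hr0, tB, termNZ, bpow, String.append_assoc]
    · have hg' : (2 ≤ B ∧ 0 < q) ∨ (B ≤ -2 ∧ q ≠ 0) := by
        rcases hg with ⟨hB, hn⟩ | ⟨hB, hn⟩
        · left
          refine ⟨hB, ?_⟩
          have hnn : 0 ≤ q := by
            rw [hq, PySem.Int.floordiv_eq_ediv_of_pos (by omega)]
            exact Int.ediv_nonneg (by omega) (by omega)
          omega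
        · exact Or.inr ⟨hB, hq0⟩
      have hmeas : 2 * q.natAbs + (if 0 < q then 1 else 0) ≤ N := by
        rcases pyDigits_measure n B hg with h1 | ⟨h1, h2, h3⟩ <;>
          by_cases hn' : 0 < n <;> by_cases hq' : 0 < q <;>
            simp only [hn', hq', if_true, if_false] at hm ⊢ <;> omega
      have IH := ih q (p + 1) hmeas hg'
      rw [if_neg hq0]
      -- reversed digits of q: nonzero leading digit
      have hLne : pyDigits q B ≠ [] := pyDigits_ne_nil _ _ hg'
      rcases hRv : (pyDigits q B).reverse with _ | ⟨d0, rest⟩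
      · exact absurd (by simpa using hRv) hLne
      have hd0 : d0 ≠ 0 := by
        apply pyDigits_getLast_ne q B d0
        rw [← List.head?_reverse, hRv]
        rfl
      have hlen : ((pyDigits q B).length : Int) = (rest.length : Int) + 1 := by
        rw [← List.length_reverse, hRv]; simp
      set K : Int := p + (rest.length : Int) + 1 with hK
      have hKpow : p + 1 + ((pyDigits q B).length : Int) - 1 = K := by rw [hlen, hK]; ring
      have hKpow2 : p + (((r :: pyDigits q B) : List Int).length : Int) - 1 = K := by
        simp only [List.length_cons]; push_cast; rw [hlen, hK]; ring
      have hK0 : K - 1 - (rest.length : Int) = p := by rw [hK]; ring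
      have hrev : ((r :: pyDigits q B) : List Int).reverse = d0 :: (rest ++ [r]) := by
        rw [List.reverse_cons, hRv]; simp
      have hIHv : goB B q (p + 1) = tB B K d0 ++ sepCat (descTerms B (K - 1) rest) := by
        rw [IH, hKpow, hRv, dstr]
        rw [show descTerms B K (d0 :: rest) = tB B K d0 :: descTerms B (K - 1) rest from by
          simp [descTerms, hd0]]
      have hRHS : dstr B (p + (((r :: pyDigits q B) : List Int).length : Int) - 1) ((r :: pyDigits q B) : List Int).reverse
          = tB B K d0 ++ (sepCat (descTerms B (K - 1) rest)
              ++ sepCat (if r = 0 then [] else [tB B p r])) := by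
        rw [hKpow2, hrev, dstr]
        rw [show descTerms B K (d0 :: (rest ++ [r])) = tB B K d0 :: descTerms B (K - 1) (rest ++ [r]) from by
          simp [descTerms, hd0]]
        rw [descTerms_append, hK0]
        show tB B K d0 ++ sepCat (descTerms B (K - 1) rest ++ if r = 0 then [] else [tB B p r]) = _
        rw [sepCat_append]
      rw [hRHS]
      by_cases hr0 : r = 0
      · rw [if_pos (by simp [hr0])]
        rw [hIHv]
        simp [hr0, sepCat]
      · rw [if_neg (term_ne_empty B r p hr0)]
        rw [hIHv]
        have hterm : (if r = 0 then ""
            else if p = 0 then PySem.Int.toStr r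
            else if r = 1 then PySem.Int.toStr B ++ "^" ++ PySem.Int.toStr p
            else PySem.Int.toStr r ++ "·" ++ PySem.Int.toStr B ++ "^" ++ PySem.Int.toStr p)
            = tB B p r := by
          simp [tB, termNZ, bpow, hr0, String.append_assoc]
        rw [hterm]
        simp [hr0, sepCat, String.append_assoc]

theorem goChar (B : Int) : ∀ (n p : Int), ((2 ≤ B ∧ 0 < n) ∨ (B ≤ -2 ∧ n ≠ 0)) →
    goB B n p = dstr B (p + ((pyDigits n B).length : Int) - 1) (pyDigits n B).reverse := by
  intro n p hg
  exact goChar_aux B (2 * n.natAbs + (if 0 < n then 1 else 0)) n p le_rfl hg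

theorem main_eq (n B : Int) (hpre : Pre_int_to_pow_sum_str n B) :
    int_to_pow_sum_str n B = int_to_pow_sum_str_alt n B := by
  by_cases hn : n = 0
  · simp [int_to_pow_sum_str, int_to_pow_sum_str_alt, hn]
  · have hg : (2 ≤ B ∧ 0 < |n|) ∨ (B ≤ -2 ∧ |n| ≠ 0) := by
      rcases hpre with h | h | h
      · exact absurd h hn
      · exact Or.inl ⟨h, abs_pos.mpr hn⟩
      · exact Or.inr ⟨h, by simpa using hn⟩
    have hLne : pyDigits |n| B ≠ [] := pyDigits_ne_nil _ _ hg
    rcases hR : (pyDigits |n| B).reverse with _ | ⟨d0, rest⟩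
    · exact absurd (by simpa using hR) hLne
    have hd0 : d0 ≠ 0 := by
      apply pyDigits_getLast_ne |n| B d0
      rw [← List.head?_reverse, hR]
      rfl
    have hLval : pyDigits |n| B = (d0 :: rest).reverse := by
      rw [← hR, List.reverse_reverse]
    have hlen : (pyDigits |n| B).length = rest.length + 1 := by
      rw [hLval]; simp
    have halt : int_to_pow_sum_str_alt n B
        = dstr B (((pyDigits |n| B).length : Int) - 1) (d0 :: rest) := by
      rw [int_to_pow_sum_str_alt, if_neg hn, goChar B |n| 0 hg, hR]
      ring_nf
    rcases rest with _ | ⟨r1, rest'⟩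
    -- single digit
    · have hL1 : pyDigits |n| B = [d0] := by simpa using hLval
      rw [int_to_pow_sum_str, if_neg hn, halt]
      simp only [hL1, List.reverse_singleton]
      rw [if_pos (by simp)]
      rw [pyGetD_zero_cons]
      simp [dstr, descTerms, sepCat, hd0, tB]
    -- at least two digits
    · have hrne : (r1 :: rest') ≠ ([] : List Int) := by simp
      rw [int_to_pow_sum_str, if_neg hn, halt]
      simp only [hR]
      rw [if_neg (by simp)]
      rw [sliceMid _ (by simp)]
      rw [pyGetD_zero_cons]
      rw [pyGetD_neg_one _ _ (by simp)]
      rw [foldA]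
      simp only [List.tail_cons]
      set a0 := (r1 :: rest').getLast hrne with ha0
      have hgl : (d0 :: r1 :: rest').getLast? = some a0 := by
        rw [getLast?_cons_of_ne_nil' hrne]
        exact List.getLast?_eq_some_getLast hrne
      rw [hgl]
      simp only [Option.getD_some]
      set k : Int := ((r1 :: rest').length : Int) with hk
      have e1 : ((d0 :: r1 :: rest').length : Int) - 1 = k := by simp [hk]
      have e2 : ((pyDigits |n| B).length : Int) - 1 = k := by
        rw [hlen]; push_cast; simp [hk]
      rw [e1, e2]
      have hk1 : k ≠ 0 := by simp [hk]; positivity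
      have hdesc : descTerms B k (d0 :: r1 :: rest') = termNZ B k d0 :: descTerms B (k - 1) (r1 :: rest') := by
        simp [descTerms, hd0, tB, hk1]
      have hds : dstr B k (d0 :: r1 :: rest') = termNZ B k d0 ++ sepCat (descTerms B (k - 1) (r1 :: rest')) := by
        rw [dstr, hdesc]
      rw [hds]
      rw [show descTerms B (k - 1) (r1 :: rest') = descTerms B (k - 1) ((r1 :: rest').dropLast ++ [a0]) from by
        rw [List.dropLast_concat_getLast hrne]]
      rw [bridge B ((r1 :: rest').dropLast) (k - 1) a0 (by simp [hk])]
      rw [sub_add_cancel]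
      have hs0 : (if d0 = 1 then PySem.Int.toStr B ++ "^" ++ PySem.Int.toStr k
            else PySem.Int.toStr d0 ++ "·" ++ PySem.Int.toStr B ++ "^" ++ PySem.Int.toStr k)
          = termNZ B k d0 := by
        by_cases hd1 : d0 = 1 <;> simp [termNZ, bpow, hd1, String.append_assoc]
      rw [hs0]
      by_cases ha : a0 = 0 <;> simp [ha, String.append_assoc]

-- ===== VERDICT (by name: the statement is the Claim_ definition above) =====
theorem int_to_pow_sum_str_spec : Claim_equal_int_to_pow_sum_str := by
  intro n B _ hpre
  unfold Spec_int_to_pow_sum_str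
  exact main_eq n B hpre
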